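-- pv_equiv track=rewrite | github.com/evga7/Algorithm-practice | 프로그래머스/1/132267. 콜라 문제/콜라 문제.py | solution
-- ===== SOURCE A (Python) =====
-- def solution(a, b, n):
--     answer = 0
--     while n>=a:
--         c=n//a
--         answer+=c*b
--         cc=n%a
--         n//=a
--         n+=cc+(c*b)
--     return answer
-- ===== SOURCE B (Python) =====
-- def solution(a, b, n):
--     # Each exchange turns a empties into b+1 empties (the bottle
--     # itself plus the b bonus A's recurrence adds back), so with rebate r=b+1
--     # the total number of exchanged groups is (n-r)//(a-r), each worth b.
--     if n < a:
--         return 0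
--     r = b + 1
--     return ((n - r) // (a - r)) * b
-- ===== Notes on version B (the rewrite author's own statement) =====
-- stated objective: simpler
-- what changed: Replaces the empty-bottle simulation loop with a single closed-form expression ((n-(b+1))//(a-(b+1)))*b.
-- outside the precondition, e.g. on solution(2, -8, 4): A returns -16, B returns -8
import Mathlib
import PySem

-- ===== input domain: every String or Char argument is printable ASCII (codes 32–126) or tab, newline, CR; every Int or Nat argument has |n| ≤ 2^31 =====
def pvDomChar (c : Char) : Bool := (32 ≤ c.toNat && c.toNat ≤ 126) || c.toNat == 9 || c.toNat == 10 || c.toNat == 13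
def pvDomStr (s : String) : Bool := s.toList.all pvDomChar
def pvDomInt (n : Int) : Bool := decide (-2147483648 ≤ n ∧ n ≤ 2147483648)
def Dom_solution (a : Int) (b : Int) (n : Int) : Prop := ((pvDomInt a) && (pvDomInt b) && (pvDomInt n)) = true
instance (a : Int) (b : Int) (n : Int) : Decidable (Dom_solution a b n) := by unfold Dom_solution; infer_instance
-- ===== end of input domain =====

-- B replaces A's empty-bottle simulation loop by a single closed-form expression (objective: simpler).


-- ===== PORT A =====
-- while-loop as fuel recursion; on Pre_ each iteration strictly decreases n, so fuel n.toNat + 1 suffices.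
def solutionLoop (a : Int) (b : Int) : Nat → Int → Int → Int
  | 0, _, answer => answer
  | fuel + 1, n, answer =>
    if n ≥ a then
      let c := PySem.Int.floordiv n a
      let answer := answer + c * b
      let cc := PySem.Int.mod n a
      let n := PySem.Int.floordiv n a
      solutionLoop a b fuel (n + cc + c * b) answer
    else answer

def solution (a : Int) (b : Int) (n : Int) : Int :=
  solutionLoop a b (n.toNat + 1) n 0

-- ===== PORT B =====
def solution_alt (a : Int) (b : Int) (n : Int) : Int :=
  if n < a then 0
  else PySem.Int.floordiv (n - (b + 1)) (a - (b + 1)) * b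

-- ===== PRECONDITION & SPEC =====
-- Pre_ restricts to the task's natural domain (2 ≤ a, 0 ≤ b ≤ a - 2, i.e. fewer bonus bottles than the
-- exchange price) plus the trivial n < a case; outside it A either diverges (b + 1 ≥ a ≤ n), raises
-- ZeroDivisionError (a = 0 ≤ n), or returns loop artefacts for negative b outside the cola problem's domain.
def Pre_solution (a : Int) (b : Int) (n : Int) : Prop :=
  n < a ∨ (2 ≤ a ∧ 0 ≤ b ∧ b + 2 ≤ a)
instance (a : Int) (b : Int) (n : Int) : Decidable (Pre_solution a b n) := by
  unfold Pre_solution; infer_instance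
def pvWitness_solution : Int × Int × Int := (3, 1, 10)

def Spec_solution (a : Int) (b : Int) (n : Int) (out : Int) : Prop := out = solution_alt a b n
instance (a : Int) (b : Int) (n : Int) (out : Int) : Decidable (Spec_solution a b n out) := by
  unfold Spec_solution; infer_instance

-- ===== CLAIM (what is proved, stated in full; the proofs are below) =====
def Claim_equal_solution : Prop := ∀ (a : Int) (b : Int) (n : Int),
  Dom_solution a b n → Pre_solution a b n → Spec_solution a b n (solution a b n)

-- ===== LEMMAS AND PROOFS =====

-- Loop invariant: with 2 ≤ a, 0 ≤ b, b + 2 ≤ a and a ≤ n < fuel, the loop adds ((n-(b+1))//(a-(b+1)))*b.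
lemma solutionLoop_closed (a b : Int) (ha : 2 ≤ a) (hb : 0 ≤ b) (hba : b + 2 ≤ a) :
    ∀ (fuel : Nat) (n ans : Int), a ≤ n → n < (fuel : Int) →
      solutionLoop a b fuel n ans = ans + PySem.Int.floordiv (n - (b + 1)) (a - (b + 1)) * b := by
  intro fuel
  induction fuel with
  | zero => intro n ans hn hf; simp at hf; omega
  | succ f ih =>
    intro n ans hn hf
    have ha0 : (0:Int) < a := by omega
    have hm0 : (0:Int) < a - (b + 1) := by omega
    -- quotient and remainder of n by a
    set c := PySem.Int.floordiv n a with hc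
    set cc := PySem.Int.mod n a with hcc
    have hsplit : c * a + cc = n := PySem.Int.floordiv_mul_add_mod n a
    have hcc0 : 0 ≤ cc := PySem.Int.mod_nonneg n ha0
    have hccA : cc < a := PySem.Int.mod_lt n ha0
    have hc1 : 1 ≤ c := by
      exact (PySem.Int.le_floordiv_iff_mul_le ha0).mpr (by omega)
    have hstep : solutionLoop a b (f + 1) n ans
        = solutionLoop a b f (c + cc + c * b) (ans + c * b) := by
      simp only [solutionLoop, ge_iff_le, hn, if_pos, ← hc, ← hcc]
    -- telescoping identity: (n - (b+1)) // m = c + ((n' - (b+1)) // m), n' = c + cc + c*b, m = a-(b+1)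
    have hkey : PySem.Int.floordiv (n - (b + 1)) (a - (b + 1))
        = c + PySem.Int.floordiv (c + cc + c * b - (b + 1)) (a - (b + 1)) := by
      have e1 : n - (b + 1) = (c + cc + c * b - (b + 1)) + c * (a - (b + 1)) := by ring_nf; omega
      rw [e1, PySem.Int.floordiv_eq_ediv_of_pos hm0, PySem.Int.floordiv_eq_ediv_of_pos hm0,
          Int.add_mul_ediv_right _ _ (by omega : a - (b + 1) ≠ 0)]
      omega
    rw [hstep]
    by_cases hn' : a ≤ c + cc + c * b
    · have hdec : c + cc + c * b < (f : Int) := by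
        have : c + cc + c * b ≤ n - c := by nlinarith
        push_cast at hf ⊢; omega
      rw [ih _ _ hn' hdec, hkey]; ring
    · -- loop exits: n' < a, and b+1 ≤ n', so the remaining quotient is 0
      have hge : b + 1 ≤ c + cc + c * b := by nlinarith
      have hz : PySem.Int.floordiv (c + cc + c * b - (b + 1)) (a - (b + 1)) = 0 := by
        rw [PySem.Int.floordiv_eq_ediv_of_pos hm0]
        exact Int.ediv_eq_zero_of_lt (by omega) (by omega)
      have hexit : solutionLoop a b f (c + cc + c * b) (ans + c * b) = ans + c * b := by
        cases f with
        | zero => simp [solutionLoop]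
        | succ f' => simp only [solutionLoop, ge_iff_le, if_neg hn']
      rw [hexit, hkey, hz]; ring

theorem solution_spec_aux (a b n : Int) (hpre : Pre_solution a b n) :
    solution a b n = solution_alt a b n := by
  by_cases hlt : n < a
  · have h1 : solution a b n = 0 := by
      simp only [solution, solutionLoop, ge_iff_le, if_neg (by omega : ¬ a ≤ n)]
    rw [h1, solution_alt, if_pos hlt]
  · rcases hpre with h | ⟨ha, hb, hba⟩
    · omega
    · have hn : a ≤ n := by omega
      have hf : n < ((n.toNat + 1 : Nat) : Int) := by push_cast; omega
      rw [solution, solutionLoop_closed a b ha hb hba _ n 0 hn hf,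
          solution_alt, if_neg hlt, zero_add]

-- ===== VERDICT (by name: the statement is the Claim_ definition above) =====
theorem solution_spec : Claim_equal_solution := by
  intro a b n _ hpre
  exact solution_spec_aux a b n hpre
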